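-- pv_equiv track=rewrite | github.com/justinryan333/itaml_atk_mk2 | bd_data_test.py | find_last_image_of_class
-- ===== SOURCE A (Python) =====
-- def find_last_image_of_class(dataset, target_class):
--     last_index = -1
--     for i, (_, label) in enumerate(dataset):
--         if label == target_class:
--             last_index = i
--     if last_index == -1:
--         raise ValueError(f"No images found for class {target_class}.")
--     return last_index
-- ===== SOURCE B (Python) =====
-- def find_last_image_of_class(dataset, target_class):
--     items = list(dataset)
--     for i in range(len(items) - 1, -1, -1):
--         if items[i][1] == target_class:
--             return i
--     raise ValueError(f"No images found for class {target_class}.")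
-- ===== Notes on version B (the rewrite author's own statement) =====
-- stated objective: alternative
-- what changed: B scans from the end and returns the first matching index immediately (early exit), instead of A's full forward sweep maintaining a last_index accumulator.
import Mathlib
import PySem

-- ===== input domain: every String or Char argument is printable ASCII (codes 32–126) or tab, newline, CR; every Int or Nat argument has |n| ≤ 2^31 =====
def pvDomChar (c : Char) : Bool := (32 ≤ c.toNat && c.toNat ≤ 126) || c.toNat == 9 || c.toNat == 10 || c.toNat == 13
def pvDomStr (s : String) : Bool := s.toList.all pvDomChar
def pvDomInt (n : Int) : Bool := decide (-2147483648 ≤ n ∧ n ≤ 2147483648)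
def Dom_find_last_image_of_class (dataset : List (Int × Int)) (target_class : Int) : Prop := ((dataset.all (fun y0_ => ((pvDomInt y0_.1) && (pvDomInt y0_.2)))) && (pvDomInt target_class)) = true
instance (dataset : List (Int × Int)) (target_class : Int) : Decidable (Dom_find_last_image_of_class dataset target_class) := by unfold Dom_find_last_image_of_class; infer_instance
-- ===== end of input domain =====

-- B scans from the end and returns on the first match (early exit) instead of A's
-- forward sweep keeping a last_index accumulator; same O(n), different control flow.
-- Both A and B raise ValueError when no label matches; Pre_ excludes exactly those inputs.

-- ===== PORT A =====
def find_last_image_of_class (dataset : List (Int × Int)) (target_class : Int) : Int :=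
  (PySem.List.enumerate dataset 0).foldl
    (fun last_index p => if p.2.2 == target_class then p.1 else last_index) (-1)

-- ===== PORT B =====
-- walks the reversed list with a descending index; -1 marks B's raise path (outside Pre_)
def pvAltGo (target_class : Int) : List (Int × Int) → Int → Int
  | [], _ => -1
  | p :: rest, i => if p.2 == target_class then i else pvAltGo target_class rest (i - 1)

def find_last_image_of_class_alt (dataset : List (Int × Int)) (target_class : Int) : Int :=
  pvAltGo target_class dataset.reverse ((dataset.length : Int) - 1)

-- ===== PRECONDITION & SPEC =====
-- Pre_ excludes exactly the inputs with no matching label, on which the Python A raises ValueError.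
def Pre_find_last_image_of_class (dataset : List (Int × Int)) (target_class : Int) : Prop :=
  ∃ p ∈ dataset, p.2 = target_class
instance (dataset : List (Int × Int)) (target_class : Int) : Decidable (Pre_find_last_image_of_class dataset target_class) := by unfold Pre_find_last_image_of_class; infer_instance

def pvWitness_find_last_image_of_class : (List (Int × Int)) × Int := ([(7, 1), (8, 0)], 1)

def Spec_find_last_image_of_class (dataset : List (Int × Int)) (target_class : Int) (out : Int) : Prop := out = find_last_image_of_class_alt dataset target_class
instance (dataset : List (Int × Int)) (target_class : Int) (out : Int) : Decidable (Spec_find_last_image_of_class dataset target_class out) := by unfold Spec_find_last_image_of_class; infer_instance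

-- ===== CLAIM (what is proved, stated in full; the proofs are below) =====
def Claim_equal_find_last_image_of_class : Prop := ∀ (dataset : List (Int × Int)) (target_class : Int), Dom_find_last_image_of_class dataset target_class → Pre_find_last_image_of_class dataset target_class → Spec_find_last_image_of_class dataset target_class (find_last_image_of_class dataset target_class)

-- ===== LEMMAS AND PROOFS =====

-- the two ports agree on ALL inputs (both return -1 on the raise path), by reverse induction
theorem pv_ports_agree (dataset : List (Int × Int)) (target_class : Int) :
    find_last_image_of_class dataset target_class = find_last_image_of_class_alt dataset target_class := by
  unfold find_last_image_of_class find_last_image_of_class_alt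
  induction dataset using List.reverseRecOn with
  | nil => simp [PySem.List.enumerate, pvAltGo]
  | append_singleton l p ih =>
    rw [PySem.List.enumerate_append]
    simp only [List.foldl_append, PySem.List.enumerate_cons, PySem.List.enumerate_nil,
      List.reverse_append, List.reverse_cons, List.reverse_nil, List.nil_append,
      List.cons_append, List.length_append, List.length_cons, List.length_nil,
      List.foldl_cons, List.foldl_nil, pvAltGo]
    by_cases h : p.2 = target_class
    · simp [h]
    · simp only [beq_iff_eq, h, if_false]
      have hidx : ((l.length + (0 + 1) : Nat) : Int) - 1 - 1 = (l.length : Int) - 1 := by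
        push_cast; ring
      rw [hidx]
      simpa using ih

-- ===== VERDICT (by name: the statement is the Claim_ definition above) =====
theorem find_last_image_of_class_spec : Claim_equal_find_last_image_of_class := by
  intro dataset target_class _ _
  exact pv_ports_agree dataset target_class
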